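-- pv_equiv track=rewrite | github.com/yann-a/Advent-of-Code | 2022/07/main.py | compute_sizes
-- ===== SOURCE A (Python) =====
-- def compute_sizes(graph, sizes, dir_sizes, current_folder):
--     score = size = 0
--     for e in graph[current_folder]:
--         if e in sizes:
--             sc, si = 0, sizes[e]
--         else:
--             sc, si = compute_sizes(graph, sizes, dir_sizes, e)
--
--         score += sc
--         size += si
--
--     dir_sizes[current_folder] = size
--     if size <= 100_000:
--         score += size
--
--     return score, size
-- ===== SOURCE B (Python) =====
-- def compute_sizes(graph, sizes, dir_sizes, current_folder):
--     # Two independent recursive passes instead of A's single pair-threading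
--     # recursion: folder_size totals a folder's subtree, folder_score sums the
--     # scores of small folders using those sizes.  dir_sizes is filled with the
--     # same entries A writes.
--     def folder_size(f):
--         total = 0
--         for e in graph[f]:
--             total += sizes[e] if e in sizes else folder_size(e)
--         dir_sizes[f] = total
--         return total
--
--     def folder_score(f):
--         score = 0
--         for e in graph[f]:
--             if e not in sizes:
--                 score += folder_score(e)
--         sz = folder_size(f)
--         return score + sz if sz <= 100000 else score
--
--     return folder_score(current_folder), folder_size(current_folder)
-- ===== Notes on version B (the rewrite author's own statement) =====
-- stated objective: alternative
-- what changed: Replaces A's single recursion that threads a (score,size) pair through every call with two independent scalar recursive passes: folder_size totals a folder's subtree, and folder_score sums scores of small folders using those sizes, at the cost of re-traversing subtrees for the size lookups.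
import Mathlib
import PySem

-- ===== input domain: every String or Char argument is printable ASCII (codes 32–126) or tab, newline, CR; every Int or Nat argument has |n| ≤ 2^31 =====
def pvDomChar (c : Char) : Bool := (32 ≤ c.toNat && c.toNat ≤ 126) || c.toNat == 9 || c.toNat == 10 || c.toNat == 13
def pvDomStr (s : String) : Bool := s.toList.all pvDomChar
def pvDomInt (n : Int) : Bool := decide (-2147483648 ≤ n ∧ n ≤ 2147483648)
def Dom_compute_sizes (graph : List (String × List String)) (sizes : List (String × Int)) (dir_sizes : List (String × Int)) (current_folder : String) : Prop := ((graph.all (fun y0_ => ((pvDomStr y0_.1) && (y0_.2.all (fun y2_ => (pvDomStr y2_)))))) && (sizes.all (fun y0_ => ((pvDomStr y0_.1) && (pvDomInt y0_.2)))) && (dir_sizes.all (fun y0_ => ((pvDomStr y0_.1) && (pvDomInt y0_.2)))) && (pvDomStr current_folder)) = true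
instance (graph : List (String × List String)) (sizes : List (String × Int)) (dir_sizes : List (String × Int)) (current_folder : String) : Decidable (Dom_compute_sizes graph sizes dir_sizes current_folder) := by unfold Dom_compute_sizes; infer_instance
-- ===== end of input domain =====

-- B replaces A's single pair-threading recursion by two independent scalar recursive
-- passes (sizes, then score); equivalence is about the RETURN value — both A and B also
-- write the same (folder, size) entries into dir_sizes, which the ports do not model.

-- ===== PORT A =====
-- A's recursion, fueled (fuel graph.length+1 always suffices under Pre_: along any
-- descent the folders are distinct keys of graph).  none = Python raises.
mutual
def csGo (graph : List (String × List String)) (sizes : List (String × Int)) : Nat → String → Option (Int × Int)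
  | 0, _ => none
  | fuel+1, f =>
    match graph.lookup f with
    | none => none
    | some children =>
      match csLoop graph sizes fuel children 0 0 with
      | none => none
      | some (score, size) =>
        if size ≤ 100000 then some (score + size, size) else some (score, size)
  termination_by fuel _ => (fuel, 0)
def csLoop (graph : List (String × List String)) (sizes : List (String × Int)) : Nat → List String → Int → Int → Option (Int × Int)
  | _, [], score, size => some (score, size)
  | fuel, e :: rest, score, size =>
    match sizes.lookup e with
    | some si => csLoop graph sizes fuel rest (score + 0) (size + si)
    | none =>
      match csGo graph sizes fuel e with
      | none => none
      | some (sc, si) => csLoop graph sizes fuel rest (score + sc) (size + si)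
  termination_by fuel cs _ _ => (fuel, cs.length + 1)
end

def compute_sizes (graph : List (String × List String)) (sizes : List (String × Int)) (dir_sizes : List (String × Int)) (current_folder : String) : Int × Int :=
  (csGo graph sizes (graph.length + 1) current_folder).getD (0, 0)

-- ===== PORT B =====
-- pass 1: folder_size
mutual
def altSize (graph : List (String × List String)) (sizes : List (String × Int)) : Nat → String → Option Int
  | 0, _ => none
  | fuel+1, f =>
    match graph.lookup f with
    | none => none
    | some children => altSizeLoop graph sizes fuel children 0
  termination_by fuel _ => (fuel, 0)
def altSizeLoop (graph : List (String × List String)) (sizes : List (String × Int)) : Nat → List String → Int → Option Int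
  | _, [], total => some total
  | fuel, e :: rest, total =>
    match sizes.lookup e with
    | some v => altSizeLoop graph sizes fuel rest (total + v)
    | none =>
      match altSize graph sizes fuel e with
      | none => none
      | some s => altSizeLoop graph sizes fuel rest (total + s)
  termination_by fuel cs _ => (fuel, cs.length + 1)
end

-- pass 2: folder_score (calls folder_size for the current folder's total)
mutual
def altScore (graph : List (String × List String)) (sizes : List (String × Int)) : Nat → String → Option Int
  | 0, _ => none
  | fuel+1, f =>
    match graph.lookup f with
    | none => none
    | some children =>
      match altScoreLoop graph sizes fuel children 0 with
      | none => none
      | some score =>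
        match altSize graph sizes (fuel+1) f with
        | none => none
        | some sz => if sz ≤ 100000 then some (score + sz) else some score
  termination_by fuel _ => (fuel, 0)
def altScoreLoop (graph : List (String × List String)) (sizes : List (String × Int)) : Nat → List String → Int → Option Int
  | _, [], score => some score
  | fuel, e :: rest, score =>
    match sizes.lookup e with
    | some _ => altScoreLoop graph sizes fuel rest score
    | none =>
      match altScore graph sizes fuel e with
      | none => none
      | some s => altScoreLoop graph sizes fuel rest (score + s)
  termination_by fuel cs _ => (fuel, cs.length + 1)
end

def compute_sizes_alt (graph : List (String × List String)) (sizes : List (String × Int)) (dir_sizes : List (String × Int)) (current_folder : String) : Int × Int :=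
  match altScore graph sizes (graph.length + 1) current_folder, altSize graph sizes (graph.length + 1) current_folder with
  | some sc, some sz => (sc, sz)
  | _, _ => ((0 : Int), (0 : Int))

-- ===== PRECONDITION & SPEC =====
-- Closed-form reachability helper for Pre_: one expansion step adds, to a set R of
-- folder names, every child of a folder of R that is not a file in sizes; iterating
-- it once more than the total number of listed names reaches the fixpoint.
def pvStep (graph : List (String × List String)) (sizes : List (String × Int)) (R : List String) : List String :=
  (R ++ (graph.filter (fun p => R.contains p.1)).flatMap
        (fun p => p.2.filter (fun e => (sizes.lookup e).isNone))).dedup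

def pvReach (graph : List (String × List String)) (sizes : List (String × Int)) (start : List String) : List String :=
  (pvStep graph sizes)^[graph.length + (graph.map (fun p => p.2.length)).sum + 1] start

-- Pre_ excludes exactly the inputs on which the Python A raises — a KeyError (a
-- reachable folder name, including current_folder, with no entry in graph) or a
-- RecursionError (a reachable cycle) — together with association lists whose keys
-- repeat, which do not encode a Python dict.
def Pre_compute_sizes (graph : List (String × List String)) (sizes : List (String × Int)) (dir_sizes : List (String × Int)) (current_folder : String) : Prop :=
  (graph.map Prod.fst).Nodup ∧ (sizes.map Prod.fst).Nodup ∧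
  (∀ f ∈ pvReach graph sizes [current_folder], f ∈ graph.map Prod.fst) ∧
  (∀ p ∈ graph, p.1 ∈ pvReach graph sizes [current_folder] →
    p.1 ∉ pvReach graph sizes (p.2.filter (fun e => (sizes.lookup e).isNone)))
instance (graph : List (String × List String)) (sizes : List (String × Int)) (dir_sizes : List (String × Int)) (current_folder : String) : Decidable (Pre_compute_sizes graph sizes dir_sizes current_folder) := by unfold Pre_compute_sizes; infer_instance

def pvWitness_compute_sizes : (List (String × List String)) × (List (String × Int)) × (List (String × Int)) × String :=
  ([("/", ["a", "f"]), ("a", [])], [("f", 10)], [], "/")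

def Spec_compute_sizes (graph : List (String × List String)) (sizes : List (String × Int)) (dir_sizes : List (String × Int)) (current_folder : String) (out : Int × Int) : Prop := out = compute_sizes_alt graph sizes dir_sizes current_folder
instance (graph : List (String × List String)) (sizes : List (String × Int)) (dir_sizes : List (String × Int)) (current_folder : String) (out : Int × Int) : Decidable (Spec_compute_sizes graph sizes dir_sizes current_folder out) := by unfold Spec_compute_sizes; infer_instance

-- ===== CLAIM (what is proved, stated in full; the proofs are below) =====
def Claim_equal_compute_sizes : Prop := ∀ (graph : List (String × List String)) (sizes : List (String × Int)) (dir_sizes : List (String × Int)) (current_folder : String), Dom_compute_sizes graph sizes dir_sizes current_folder → Pre_compute_sizes graph sizes dir_sizes current_folder → Spec_compute_sizes graph sizes dir_sizes current_folder (compute_sizes graph sizes dir_sizes current_folder)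

-- ===== LEMMAS AND PROOFS =====

-- B's size pass returns exactly the second component of A's recursion.
theorem altSize_eq (graph : List (String × List String)) (sizes : List (String × Int)) :
    ∀ fuel f, altSize graph sizes fuel f = (csGo graph sizes fuel f).map Prod.snd := by
  intro fuel
  induction fuel with
  | zero => intro f; simp [altSize, csGo]
  | succ fuel ih =>
    have loopEq : ∀ cs s t, altSizeLoop graph sizes fuel cs t
        = (csLoop graph sizes fuel cs s t).map Prod.snd := by
      intro cs
      induction cs with
      | nil => intro s t; simp [altSizeLoop, csLoop]
      | cons e rest ihc =>
        intro s t
        simp only [altSizeLoop, csLoop]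
        cases hs : sizes.lookup e with
        | some v => exact ihc (s + 0) (t + v)
        | none =>
          dsimp only
          rw [ih e]
          cases hg : csGo graph sizes fuel e with
          | none => rfl
          | some p => exact ihc (s + p.1) (t + p.2)
    intro f
    simp only [altSize, csGo]
    cases hg : graph.lookup f with
    | none => rfl
    | some children =>
      dsimp only
      rw [loopEq children 0 0]
      cases hl : csLoop graph sizes fuel children 0 0 with
      | none => rfl
      | some p =>
        obtain ⟨score, size⟩ := p
        by_cases h : size ≤ 100000 <;> simp [h]

-- B's score pass returns exactly the first component of A's recursion.
theorem altScore_eq (graph : List (String × List String)) (sizes : List (String × Int)) :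
    ∀ fuel f, altScore graph sizes fuel f = (csGo graph sizes fuel f).map Prod.fst := by
  intro fuel
  induction fuel with
  | zero => intro f; simp [altScore, csGo]
  | succ fuel ih =>
    have loopEq : ∀ cs s t, altScoreLoop graph sizes fuel cs s
        = (csLoop graph sizes fuel cs s t).map Prod.fst := by
      intro cs
      induction cs with
      | nil => intro s t; simp [altScoreLoop, csLoop]
      | cons e rest ihc =>
        intro s t
        simp only [altScoreLoop, csLoop]
        cases hs : sizes.lookup e with
        | some v =>
          dsimp only
          rw [Int.add_zero]
          exact ihc s (t + v)
        | none =>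
          dsimp only
          rw [ih e]
          cases hg : csGo graph sizes fuel e with
          | none => rfl
          | some p => exact ihc (s + p.1) (t + p.2)
    intro f
    simp only [altScore]
    cases hg : graph.lookup f with
    | none => simp [csGo, hg]
    | some children =>
      dsimp only
      rw [loopEq children 0 0]
      cases hl : csLoop graph sizes fuel children 0 0 with
      | none => simp [csGo, hg, hl]
      | some p =>
        obtain ⟨score, size⟩ := p
        rw [altSize_eq]
        simp only [csGo, hg, hl]
        by_cases h : size ≤ 100000 <;> simp [h]

theorem ports_agree (graph : List (String × List String)) (sizes : List (String × Int)) (dir_sizes : List (String × Int)) (current_folder : String) :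
    compute_sizes graph sizes dir_sizes current_folder = compute_sizes_alt graph sizes dir_sizes current_folder := by
  unfold compute_sizes compute_sizes_alt
  rw [altScore_eq, altSize_eq]
  cases hg : csGo graph sizes (graph.length + 1) current_folder with
  | none => rfl
  | some p => rfl

-- ===== VERDICT (by name: the statement is the Claim_ definition above) =====
theorem compute_sizes_spec : Claim_equal_compute_sizes := by
  intro graph sizes dir_sizes current_folder _ _
  unfold Spec_compute_sizes
  exact ports_agree graph sizes dir_sizes current_folder
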